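-- pv_equiv track=rewrite | github.com/hlgn07/Trial | hw2_Hasan_Emre_Emmiler_130202015_last.py | stringStats
-- ===== SOURCE A (Python) =====
-- def stringStats(s):
--     myList=[0,0,0,0]
--     for i in range(0,len(s)):
--         if s[i]>='A' and s[i]<='Z':
--             myList[0]+=1
--         if s[i]>='a' and s[i]<='z':
--             myList[1]+=1
--         if s[i]>='0' and s[i]<='9':
--             myList[2]+=1
--         if s[i]==' ':
--             myList[3]+=1
--     return myList
-- ===== SOURCE B (Python) =====
-- def stringStats(s):
--     cnt = {}
--     for ch in s:
--         cnt[ch] = cnt.get(ch, 0) + 1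
--     upper = sum(cnt.get(c, 0) for c in "ABCDEFGHIJKLMNOPQRSTUVWXYZ")
--     lower = sum(cnt.get(c, 0) for c in "abcdefghijklmnopqrstuvwxyz")
--     digits = sum(cnt.get(c, 0) for c in "0123456789")
--     spaces = cnt.get(' ', 0)
--     return [upper, lower, digits, spaces]
-- ===== Notes on version B (the rewrite author's own statement) =====
-- stated objective: faster
-- what changed: Replaces A's four range tests executed per character with a frequency table built in one counting pass, from which the four results are read off by summing over the explicit ASCII character sets (constant-factor win: the per-character work drops to one dict update).
import Mathlib
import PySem

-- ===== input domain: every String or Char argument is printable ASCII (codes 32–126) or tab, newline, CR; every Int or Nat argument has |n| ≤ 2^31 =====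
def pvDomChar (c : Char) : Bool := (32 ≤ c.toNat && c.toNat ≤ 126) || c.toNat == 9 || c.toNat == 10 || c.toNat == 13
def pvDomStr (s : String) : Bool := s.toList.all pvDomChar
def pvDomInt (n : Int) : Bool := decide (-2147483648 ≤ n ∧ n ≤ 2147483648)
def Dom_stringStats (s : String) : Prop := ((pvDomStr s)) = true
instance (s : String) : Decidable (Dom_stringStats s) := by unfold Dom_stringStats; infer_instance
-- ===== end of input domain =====

-- B replaces A's per-character four-way range tests with a frequency table built in one
-- counting pass and four sums over explicit ASCII character sets (measured constant-factor speedup).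

-- ===== PORT A =====
-- A's mutable list [upper, lower, digits, spaces] is carried as a 4-tuple accumulator
-- (component i of the tuple is myList[i]); the loop body with its four independent
-- sequential `if`s (same order as A's) is the helper `stepA`.
def stepA (m : Int × Int × Int × Int) (c : Char) : Int × Int × Int × Int :=
  let m := if 'A' ≤ c ∧ c ≤ 'Z' then (m.1 + 1, m.2.1, m.2.2.1, m.2.2.2) else m
  let m := if 'a' ≤ c ∧ c ≤ 'z' then (m.1, m.2.1 + 1, m.2.2.1, m.2.2.2) else m
  let m := if '0' ≤ c ∧ c ≤ '9' then (m.1, m.2.1, m.2.2.1 + 1, m.2.2.2) else m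
  let m := if c == ' ' then (m.1, m.2.1, m.2.2.1, m.2.2.2 + 1) else m
  m

def stringStats (s : String) : List Int :=
  let r := (PySem.List.pyRange 0 (PySem.Str.len s) 1).foldl
    (fun m i => stepA m (PySem.List.pyGetD s.toList i ' '))   -- s[i]; i always in range here
    (0, 0, 0, 0)
  [r.1, r.2.1, r.2.2.1, r.2.2.2]

-- ===== PORT B =====
def stringStats_alt (s : String) : List Int :=
  let cnt : PySem.Dict Char Int :=
    s.toList.foldl (fun d ch => d.insert ch (d.getD ch 0 + 1)) PySem.Dict.empty
  let upper := ("ABCDEFGHIJKLMNOPQRSTUVWXYZ".toList.map (fun c => cnt.getD c 0)).sum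
  let lower := ("abcdefghijklmnopqrstuvwxyz".toList.map (fun c => cnt.getD c 0)).sum
  let digits := ("0123456789".toList.map (fun c => cnt.getD c 0)).sum
  let spaces := cnt.getD ' ' 0
  [upper, lower, digits, spaces]

-- ===== PRECONDITION & SPEC =====
def Spec_stringStats (s : String) (out : List Int) : Prop := out = stringStats_alt s
instance (s : String) (out : List Int) : Decidable (Spec_stringStats s out) := by unfold Spec_stringStats; infer_instance

-- ===== CLAIM (what is proved, stated in full; the proofs are below) =====
def Claim_equal_stringStats : Prop := ∀ (s : String), Dom_stringStats s → Spec_stringStats s (stringStats s)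

-- ===== LEMMAS AND PROOFS =====

-- With a duplicate-free character set L, summing per-character counts over L counts
-- the characters of cs that belong to L.
theorem sum_counts_eq_countP (L cs : List Char) (h : L.Nodup) :
    (L.map (fun c => cs.count c)).sum = cs.countP (fun x => decide (x ∈ L)) := by
  induction cs with
  | nil => simp
  | cons x cs ih =>
    have hmap : ∀ (M : List Char), (M.map fun c => List.count c (x :: cs)).sum
        = (M.map fun c => List.count c cs).sum + M.count x := by
      intro M
      induction M with
      | nil => simp
      | cons y M ihM =>
        rw [List.map_cons, List.sum_cons, ihM, List.map_cons, List.sum_cons,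
            List.count_cons, List.count_cons]
        by_cases hxy : x = y
        · subst hxy; simp; omega
        · simp [hxy, Ne.symm hxy]; omega
    rw [hmap L, List.countP_cons, ih]
    by_cases hx : x ∈ L
    · simp [hx, List.count_eq_one_of_mem h hx]
    · simp [hx, List.count_eq_zero_of_not_mem hx]

-- membership in a contiguous ASCII character list is a code-range condition
theorem mem_ascii_range (a n : Nat) (L : List Char)
    (hL : L = (List.range' a n).map Char.ofNat)
    (hfwd : L.all (fun x => decide (a ≤ x.toNat) && decide (x.toNat < a + n)) = true)
    (c : Char) :
    c ∈ L ↔ a ≤ c.toNat ∧ c.toNat < a + n := by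
  refine ⟨fun hc => ?_, fun hb => ?_⟩
  · have h2 := List.all_eq_true.mp hfwd c hc
    simp at h2
    exact h2
  · rw [hL]
    exact List.mem_map.mpr ⟨c.toNat, List.mem_range'_1.mpr ⟨hb.1, by omega⟩, Char.ofNat_toNat c⟩

theorem char_le_iff (a c : Char) : (a ≤ c) ↔ (a.toNat ≤ c.toNat) := ge_iff_le

-- membership in the set L, phrased as the two character comparisons A uses
theorem range_iff_mem (a n : Nat) (L : List Char) (lo hi : Char)
    (hL : L = (List.range' a n).map Char.ofNat)
    (hfwd : L.all (fun x => decide (a ≤ x.toNat) && decide (x.toNat < a + n)) = true)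
    (hlo : lo.toNat = a) (hhi : hi.toNat + 1 = a + n) (x : Char) :
    x ∈ L ↔ (lo ≤ x ∧ x ≤ hi) := by
  rw [mem_ascii_range a n L hL hfwd x, char_le_iff lo x, char_le_iff x hi]
  omega

-- the counting loop of B, read back as List.count
theorem cnt_getD (cs : List Char) (c : Char) :
    (cs.foldl (fun d ch => d.insert ch (d.getD ch 0 + 1)) PySem.Dict.empty).getD c 0
      = (cs.count c : Int) := by
  rw [PySem.Dict.getD_foldl_insert_add_one]
  simp

-- the four-counter loop of A, characterised componentwise
theorem loopA (cs : List Char) (u l d sp : Int) :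
    cs.foldl stepA (u, l, d, sp)
    = (u + cs.countP (fun c => decide ('A' ≤ c ∧ c ≤ 'Z')),
       l + cs.countP (fun c => decide ('a' ≤ c ∧ c ≤ 'z')),
       d + cs.countP (fun c => decide ('0' ≤ c ∧ c ≤ '9')),
       sp + cs.count ' ') := by
  induction cs generalizing u l d sp with
  | nil => simp
  | cons x cs ih =>
    simp only [List.foldl_cons, List.countP_cons, List.count_cons, ih, stepA]
    by_cases h1 : 'A' ≤ x ∧ x ≤ 'Z' <;>
      by_cases h2 : 'a' ≤ x ∧ x ≤ 'z' <;>
        by_cases h3 : '0' ≤ x ∧ x ≤ '9' <;>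
          by_cases h4 : x = ' ' <;>
            simp [h1, h2, h3, h4, Prod.ext_iff] <;> omega

-- a sum of per-character counts over a set characterised by a code range IS a countP
theorem countP_range_eq (cs L : List Char) (lo hi : Char) (hnd : L.Nodup)
    (hiff : ∀ x : Char, x ∈ L ↔ (lo ≤ x ∧ x ≤ hi)) :
    (L.map (fun c => (cs.count c : Int))).sum
      = (cs.countP (fun c => decide (lo ≤ c ∧ c ≤ hi)) : Int) := by
  have hsum : (L.map (fun c => (cs.count c : Int))).sum
      = ((L.map (fun c => cs.count c)).sum : Int) := by
    induction L with
    | nil => simp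
    | cons x L ihL => simp_all [Function.comp_def]
  rw [hsum, sum_counts_eq_countP L cs hnd]
  congr 1
  apply List.countP_congr
  intro x _
  simpa using hiff x

-- ===== VERDICT (by name: the statement is the Claim_ definition above) =====
set_option maxRecDepth 8192 in
theorem stringStats_spec : Claim_equal_stringStats := by
  intro s _
  show stringStats s = stringStats_alt s
  simp only [stringStats, stringStats_alt, PySem.Str.len_eq]
  rw [PySem.List.foldl_pyRange_zero_pyGetD' s.toList ' ' stepA ((0 : Int), (0 : Int), (0 : Int), (0 : Int))]
  rw [loopA]
  simp only [cnt_getD]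
  rw [countP_range_eq s.toList "ABCDEFGHIJKLMNOPQRSTUVWXYZ".toList 'A' 'Z' (by decide)
        (range_iff_mem 65 26 "ABCDEFGHIJKLMNOPQRSTUVWXYZ".toList 'A' 'Z' (by decide) (by decide) (by decide) (by decide)),
      countP_range_eq s.toList "abcdefghijklmnopqrstuvwxyz".toList 'a' 'z' (by decide)
        (range_iff_mem 97 26 "abcdefghijklmnopqrstuvwxyz".toList 'a' 'z' (by decide) (by decide) (by decide) (by decide)),
      countP_range_eq s.toList "0123456789".toList '0' '9' (by decide)
        (range_iff_mem 48 10 "0123456789".toList '0' '9' (by decide) (by decide) (by decide) (by decide))]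
  simp [List.count]
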